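-- pv_equiv track=rewrite | github.com/activeloopai/deeplake | hub/dataset.py | _common_shape
-- ===== SOURCE A (Python) =====
-- from typing import Tuple, Dict
--
-- def _common_shape(shapes: Tuple[int, ...]) -> Tuple[int, ...]:
--     shapes = [shapes[k] for k in shapes]
--     shapes = sorted(shapes, key=lambda x: len(x))
--     min_shape = shapes[0]
--     common_shape = []
--     for dim in range(len(min_shape)):
--         for shp in shapes:
--             if min_shape[dim] != shp[dim]:
--                 return common_shape
--         common_shape.append(min_shape[dim])
--     return common_shape
-- ===== SOURCE B (Python) =====
-- def _common_shape(shapes):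
--     vals = [shapes[k] for k in shapes]
--     prefix = vals[0]
--     for s in vals[1:]:
--         i = 0
--         while i < len(prefix) and i < len(s) and prefix[i] == s[i]:
--             i += 1
--         prefix = prefix[:i]
--     return list(prefix)
-- ===== Notes on version B (the rewrite author's own statement) =====
-- stated objective: alternative
-- what changed: B drops the sort and the per-dimension scan over all shapes entirely: it folds over the shapes pairwise, maintaining a single running common prefix that is shortened by an inner while loop at each step (reduce with a pairwise longest-common-prefix), instead of A's sort-by-length, pick-shortest, then column-wise comparison across all shapes per dimension.
import Mathlib
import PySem

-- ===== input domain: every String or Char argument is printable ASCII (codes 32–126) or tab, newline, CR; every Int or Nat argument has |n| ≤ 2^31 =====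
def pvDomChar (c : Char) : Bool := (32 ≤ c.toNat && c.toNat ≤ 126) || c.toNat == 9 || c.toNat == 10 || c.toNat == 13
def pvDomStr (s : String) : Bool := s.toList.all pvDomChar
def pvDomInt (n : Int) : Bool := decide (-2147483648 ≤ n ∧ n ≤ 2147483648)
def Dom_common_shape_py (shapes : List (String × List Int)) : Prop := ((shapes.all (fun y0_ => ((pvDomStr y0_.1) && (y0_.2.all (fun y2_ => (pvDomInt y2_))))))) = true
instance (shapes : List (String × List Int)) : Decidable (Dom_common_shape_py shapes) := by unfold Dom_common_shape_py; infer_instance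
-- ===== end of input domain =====

-- B replaces A's sort-by-length + per-dimension scan over all shapes with a pairwise fold:
-- a running common prefix shortened by an inner while loop at each shape (objective: alternative).

-- ===== PORT A =====
-- outer 'for dim in range(len(min_shape))' with early return; the inner
-- 'for shp in shapes: if …: return common_shape' is the List.any existence scan
def pyALoop (svals : List (List Int)) (minS : List Int) : List Nat → List Int → List Int
  | [], acc => acc
  | dim :: rest, acc =>
    if svals.any (fun shp => minS.getD dim 0 != shp.getD dim 0) then acc
    else pyALoop svals minS rest (acc ++ [minS.getD dim 0])

def common_shape_py (shapes : List (String × List Int)) : List Int :=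
  let d := PySem.Dict.mk shapes
  -- shapes = [shapes[k] for k in shapes]
  let vals := (PySem.Dict.keys d).map (fun k => (PySem.Dict.get? d k).getD [])
  -- shapes = sorted(shapes, key=lambda x: len(x))
  let svals := PySem.List.sorted vals (fun x => (x.length : Int)) false
  -- min_shape = shapes[0]  (IndexError on the empty dict: excluded by Pre_)
  let minS := svals.headD []
  pyALoop svals minS (List.range minS.length) []

-- ===== PORT B =====
-- 'while i < len(prefix) and i < len(s) and prefix[i] == s[i]: i += 1'
-- (indices are nonnegative and in range here, so getD is exact for prefix[i]/s[i])
def pyWhile (pre s : List Int) (i : Nat) : Nat :=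
  if i < pre.length ∧ i < s.length ∧ pre.getD i 0 = s.getD i 0 then
    pyWhile pre s (i + 1)
  else i
termination_by pre.length - i

def common_shape_py_alt (shapes : List (String × List Int)) : List Int :=
  let d := PySem.Dict.mk shapes
  -- vals = [shapes[k] for k in shapes]
  let vals := (PySem.Dict.keys d).map (fun k => (PySem.Dict.get? d k).getD [])
  -- prefix = vals[0]  (IndexError on the empty dict: excluded by Pre_)
  let p0 := vals.headD []
  -- for s in vals[1:]: … prefix = prefix[:i]   (prefix[:i] with 0 ≤ i is List.take i, exact)
  vals.tail.foldl (fun pre s => pre.take (pyWhile pre s 0)) p0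

-- ===== PRECONDITION & SPEC =====
-- Pre_ excludes only the empty dict, on which both A and B raise IndexError ([...][0]).
def Pre_common_shape_py (shapes : List (String × List Int)) : Prop := shapes ≠ []
instance (shapes : List (String × List Int)) : Decidable (Pre_common_shape_py shapes) := by unfold Pre_common_shape_py; infer_instance
def pvWitness_common_shape_py : (List (String × List Int)) := [("a", [2, 3]), ("b", [2, 4])]

def Spec_common_shape_py (shapes : List (String × List Int)) (out : List Int) : Prop := out = common_shape_py_alt shapes
instance (shapes : List (String × List Int)) (out : List Int) : Decidable (Spec_common_shape_py shapes out) := by unfold Spec_common_shape_py; infer_instance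

-- ===== CLAIM (what is proved, stated in full; the proofs are below) =====
def Claim_equal_common_shape_py : Prop := ∀ (shapes : List (String × List Int)), Dom_common_shape_py shapes → Pre_common_shape_py shapes → Spec_common_shape_py shapes (common_shape_py shapes)

-- ===== LEMMAS AND PROOFS =====

-- structural longest common prefix of two lists
def lcp : List Int → List Int → List Int
  | x :: xs, y :: ys => if x = y then x :: lcp xs ys else []
  | _, _ => []

lemma lcp_nil_right (a : List Int) : lcp a [] = [] := by cases a <;> rfl

lemma lcp_prefix_left (a b : List Int) : lcp a b <+: a := by
  induction a generalizing b with
  | nil => cases b <;> simp [lcp]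
  | cons x xs ih =>
    cases b with
    | nil => simp [lcp]
    | cons y ys =>
      by_cases h : x = y
      · simpa [lcp, h] using ih ys
      · simp [lcp, h]

lemma lcp_prefix_right (a b : List Int) : lcp a b <+: b := by
  induction a generalizing b with
  | nil => cases b <;> simp [lcp]
  | cons x xs ih =>
    cases b with
    | nil => simp [lcp]
    | cons y ys =>
      by_cases h : x = y
      · simpa [lcp, h] using ih ys
      · simp [lcp, h]

lemma lcp_greatest {c a b : List Int} (ha : c <+: a) (hb : c <+: b) : c <+: lcp a b := by
  induction c generalizing a b with
  | nil => simp
  | cons x xs ih =>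
    rcases a with _ | ⟨a0, as⟩
    · exact absurd ha (by simp)
    rcases b with _ | ⟨b0, bs⟩
    · exact absurd hb (by simp)
    obtain ⟨rfl, ha'⟩ := List.cons_prefix_cons.mp ha
    obtain ⟨rfl, hb'⟩ := List.cons_prefix_cons.mp hb
    simpa [lcp] using ih ha' hb'

-- pyWhile computes the length of the pairwise common prefix
lemma pyWhile_eq (pre s : List Int) (i : Nat) :
    pyWhile pre s i = i + (lcp (pre.drop i) (s.drop i)).length := by
  fun_induction pyWhile pre s i with
  | case1 i h ih =>
    obtain ⟨h1, h2, h3⟩ := h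
    rw [ih, List.drop_eq_getElem_cons h1, List.drop_eq_getElem_cons h2]
    have heq : pre[i] = s[i] := by
      rwa [List.getD_eq_getElem _ _ h1, List.getD_eq_getElem _ _ h2] at h3
    simp [lcp, heq]; omega
  | case2 i h =>
    push Not at h
    by_cases h1 : i < pre.length
    · by_cases h2 : i < s.length
      · have h3 := h h1 h2
        rw [List.drop_eq_getElem_cons h1, List.drop_eq_getElem_cons h2]
        have hne : pre[i] ≠ s[i] := by
          rwa [List.getD_eq_getElem _ _ h1, List.getD_eq_getElem _ _ h2] at h3
        simp [lcp, hne]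
      · rw [List.drop_eq_nil_of_le (as := s) (by omega), lcp_nil_right]; simp
    · rw [List.drop_eq_nil_of_le (α := Int) (by omega)]; simp [lcp]

lemma step_eq (pre s : List Int) : pre.take (pyWhile pre s 0) = lcp pre s := by
  have h := pyWhile_eq pre s 0
  simp only [List.drop_zero, Nat.zero_add] at h
  rw [h, ← List.prefix_iff_eq_take.mp (lcp_prefix_left pre s)]

lemma foldl_step_eq (vs : List (List Int)) (v : List Int) :
    vs.foldl (fun pre s => pre.take (pyWhile pre s 0)) v = vs.foldl lcp v := by
  induction vs generalizing v with
  | nil => rfl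
  | cons s vs ih => simp only [List.foldl_cons, step_eq]

lemma foldl_lcp_prefix (vs : List (List Int)) (v : List Int) :
    ∀ u ∈ v :: vs, vs.foldl lcp v <+: u := by
  induction vs generalizing v with
  | nil => intro u hu; simp at hu; simp [hu]
  | cons s vs ih =>
    intro u hu
    simp only [List.foldl_cons]
    rcases List.mem_cons.mp hu with rfl | hu'
    · exact (ih (lcp u s) _ (by simp)).trans (lcp_prefix_left u s)
    rcases List.mem_cons.mp hu' with rfl | hu''
    · exact (ih (lcp v u) _ (by simp)).trans (lcp_prefix_right v u)
    · exact ih (lcp v s) u (by simp [hu''])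

lemma foldl_lcp_greatest (vs : List (List Int)) (v : List Int) (c : List Int)
    (h : ∀ u ∈ v :: vs, c <+: u) : c <+: vs.foldl lcp v := by
  induction vs generalizing v with
  | nil => exact h v (by simp)
  | cons s vs ih =>
    simp only [List.foldl_cons]
    apply ih
    intro u hu
    rcases List.mem_cons.mp hu with h' | hu'
    · rw [h']; exact lcp_greatest (h v (by simp)) (h s (by simp))
    · exact h u (by simp [hu'])

-- A's loop is a takeWhile over the dimension range
lemma pyALoop_eq (svals : List (List Int)) (minS : List Int) (dims : List Nat) (acc : List Int) :
    pyALoop svals minS dims acc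
      = acc ++ ((dims.takeWhile (fun dim => !(svals.any (fun shp => minS.getD dim 0 != shp.getD dim 0)))).map
          (fun dim => minS.getD dim 0)) := by
  induction dims generalizing acc with
  | nil => simp [pyALoop]
  | cons dim rest ih =>
    by_cases h : (svals.any (fun shp => minS.getD dim 0 != shp.getD dim 0)) = true
    · rw [pyALoop, if_pos h, List.takeWhile_cons_of_neg (by rw [Bool.not_eq_true', h]; simp)]
      simp
    · rw [pyALoop, if_neg h, List.takeWhile_cons_of_pos (by rw [Bool.not_eq_true']; exact Bool.eq_false_iff.mpr h), ih]
      simp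

-- after takeWhile stops inside the list, the predicate fails at that position
lemma takeWhile_stop {α : Type} (p : α → Bool) (l : List α) (h : (l.takeWhile p).length < l.length) :
    p (l[(l.takeWhile p).length]'h) = false := by
  induction l with
  | nil => simp at h
  | cons a l ih =>
    by_cases hp : p a
    · simp only [List.takeWhile_cons, hp] at h ⊢
      simpa using ih (by simpa using h)
    · simp [List.takeWhile_cons, hp]

-- map getD over range k = take k, for k ≤ len
lemma map_getD_range (l : List Int) (k : Nat) (hk : k ≤ l.length) :
    (List.range k).map (fun i => l.getD i 0) = l.take k := by
  apply List.ext_getElem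
  · simp; omega
  · intro i h1 h2
    simp only [List.getElem_map, List.getElem_range, List.getElem_take]
    simp at h1
    rw [List.getD_eq_getElem _ _ (by omega)]

-- the core equality over the extracted value list
lemma core (vals : List (List Int)) (hvne : vals ≠ []) :
    pyALoop (PySem.List.sorted vals (fun x => (x.length : Int)) false)
        ((PySem.List.sorted vals (fun x => (x.length : Int)) false).headD [])
        (List.range ((PySem.List.sorted vals (fun x => (x.length : Int)) false).headD []).length) []
      = vals.tail.foldl (fun pre s => pre.take (pyWhile pre s 0)) (vals.headD []) := by
  obtain ⟨v, vs, rfl⟩ : ∃ v vs, vals = v :: vs := by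
    cases vals with
    | nil => exact absurd rfl hvne
    | cons v vs => exact ⟨v, vs, rfl⟩
  obtain ⟨m, t, hmt⟩ : ∃ m t, PySem.List.sorted (v :: vs) (fun x => (x.length : Int)) false = m :: t := by
    cases hs : PySem.List.sorted (v :: vs) (fun x => (x.length : Int)) false with
    | nil => exact absurd ((PySem.List.sorted_eq_nil_iff _ _ _).mp hs) (by simp)
    | cons m t => exact ⟨m, t, rfl⟩
  have hmem : ∀ x, x ∈ (m :: t) ↔ x ∈ (v :: vs) := by
    intro x; rw [← hmt]; exact PySem.List.mem_sorted _ _ _ _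
  have hminmem : m ∈ (v :: vs) := (hmem m).mp (by simp)
  have hle : ∀ y ∈ (v :: vs), m.length ≤ y.length := by
    intro y hy
    exact_mod_cast PySem.List.key_head_sorted_le (v :: vs) (fun x => (x.length : Int)) hmt y hy
  rw [hmt]
  simp only [List.headD_cons, List.tail_cons]
  rw [pyALoop_eq, foldl_step_eq, List.nil_append]
  set p : Nat → Bool := fun dim => !((m :: t).any (fun shp => m.getD dim 0 != shp.getD dim 0)) with hp
  set k := ((List.range m.length).takeWhile p).length with hk
  have hkle : k ≤ m.length := by
    have := (List.takeWhile_prefix (l := List.range m.length) (p := p)).length_le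
    simpa [← hk] using this
  have hpre := List.takeWhile_prefix (l := List.range m.length) (p := p)
  have htw : (List.range m.length).takeWhile p = List.range k := by
    rw [List.prefix_iff_eq_take.mp hpre, ← hk, List.take_range, min_eq_left hkle]
  have hA : (((List.range m.length).takeWhile p).map (fun dim => m.getD dim 0)) = m.take k := by
    rw [htw, map_getD_range m k hkle]
  rw [hA]
  -- agreement below k
  have huni : ∀ i, i < k → ∀ u ∈ (v :: vs), u.getD i 0 = m.getD i 0 := by
    intro i hi u hu
    have hmemtw : i ∈ (List.range m.length).takeWhile p := by
      rw [htw]; exact List.mem_range.mpr hi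
    have hpi : p i = true := List.mem_takeWhile_imp hmemtw
    simp only [hp] at hpi
    have hfalse : ((m :: t).any (fun shp => m.getD i 0 != shp.getD i 0)) = false := by
      simpa using hpi
    have hall := List.any_eq_false.mp hfalse u ((hmem u).mpr hu)
    exact (bne_eq_false_iff_eq.mp (Bool.eq_false_iff.mpr hall)).symm
  -- (a) m.take k is a prefix of every val
  have hAprefix : ∀ u ∈ (v :: vs), m.take k <+: u := by
    intro u hu
    have hul : k ≤ u.length := le_trans hkle (hle u hu)
    have : u.take k = m.take k := by
      apply List.ext_getElem
      · simp; omega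
      · intro i h1 h2
        simp only [List.getElem_take]
        simp at h1
        have := huni i (by omega) u hu
        rwa [List.getD_eq_getElem _ _ (by omega), List.getD_eq_getElem _ _ (by omega)] at this
    rw [← this]
    exact List.take_prefix _ _
  -- (b) any common prefix of every val is a prefix of m.take k
  have hAgreatest : ∀ c : List Int, (∀ u ∈ (v :: vs), c <+: u) → c <+: m.take k := by
    intro c hc
    have hcm := hc m hminmem
    have hclen : c.length ≤ k := by
      by_contra hlt
      push Not at hlt
      have hkm : k < m.length := lt_of_lt_of_le hlt (hcm.length_le)
      have hstop := takeWhile_stop p (List.range m.length) (by simpa [← hk, List.length_range] using hkm)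
      have hpk : p k = false := by
        have : (List.range m.length)[((List.range m.length).takeWhile p).length]'(by simpa using hkm) = k := by
          simp [← hk]
        rwa [this] at hstop
      rw [hp] at hpk
      have hpk' : ((m :: t).any (fun shp => m.getD k 0 != shp.getD k 0)) = true := by
        simpa using hpk
      obtain ⟨shp, hshp, hne⟩ := List.any_eq_true.mp hpk'
      have hne' : m.getD k 0 ≠ shp.getD k 0 := bne_iff_ne.mp hne
      have hcshp := hc shp ((hmem shp).mp hshp)
      have hklen_shp : k < shp.length := lt_of_lt_of_le hlt hcshp.length_le
      have e1 : m.getD k 0 = c.getD k 0 := by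
        rw [List.getD_eq_getElem _ _ hkm, List.getD_eq_getElem _ _ hlt]
        exact (List.IsPrefix.getElem hcm (i := k) hlt).symm
      have e2 : shp.getD k 0 = c.getD k 0 := by
        rw [List.getD_eq_getElem _ _ hklen_shp, List.getD_eq_getElem _ _ hlt]
        exact (List.IsPrefix.getElem hcshp (i := k) hlt).symm
      exact hne' (e1.trans e2.symm)
    have hceq : c = (m.take k).take c.length := by
      rw [List.take_take, min_eq_left hclen]
      exact List.prefix_iff_eq_take.mp hcm
    rw [hceq]
    exact List.take_prefix _ _
  -- both sides equal by mutual prefix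
  have h1 : m.take k <+: vs.foldl lcp v := foldl_lcp_greatest vs v _ hAprefix
  have h2 : vs.foldl lcp v <+: m.take k := hAgreatest _ (foldl_lcp_prefix vs v)
  exact h2.eq_of_length (le_antisymm h2.length_le h1.length_le) |>.symm

-- ===== VERDICT (by name: the statement is the Claim_ definition above) =====
theorem common_shape_py_spec : Claim_equal_common_shape_py := by
  intro shapes _ hpre
  unfold Spec_common_shape_py common_shape_py common_shape_py_alt
  exact core ((PySem.Dict.keys (PySem.Dict.mk shapes)).map
      (fun k => (PySem.Dict.get? (PySem.Dict.mk shapes) k).getD []))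
    (by cases shapes with
        | nil => exact absurd rfl hpre
        | cons p ps => simp [PySem.Dict.keys])
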